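-- pv_equiv track=rewrite | github.com/danielgs-research/finiteICA | deprecated/some_ICA_functions_and_such/BSS_functions.py | tuple_given
-- ===== SOURCE A (Python) =====
-- def tuple_given(number,n_sources,prime):
--     """
--     returns a tuple given which number it is
--     and n_sources and prime
--
--     example:
--         number = 10
--         n_sources = 3
--         prime = 3
--
--         The number base = prime,
--         the maximum slots for fullfilling is n_sources, and the number in this
--         form is:
--             (1,0,1)
--
--             3**2 + 3**0 = 10, as expected
--     """
--     remainders = []
--     quotient = number
--
--     while(True):
--         quotient, r = (divmod(quotient,prime))
--         remainders.append(r)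
--
--         if quotient == 0:
--             break
--
--     while(len(remainders) < n_sources):
--         remainders.append(0)
--
--
--     remainders.reverse()
--     return tuple(remainders)
-- ===== SOURCE B (Python) =====
-- def tuple_given(number, n_sources, prime):
--     # digit count first (incremental power), then a zero block and one
--     # positional most-significant-first extraction pass
--     d, pw = 1, prime                      # pw == prime ** d
--     while pw <= number:
--         d += 1
--         pw *= prime
--     L = max(d, n_sources)
--     digits = [0] * (L - d)
--     pw //= prime                          # prime ** (d - 1)
--     for _ in range(d):
--         digits.append((number // pw) % prime)
--         pw //= prime
--     return tuple(digits)
-- ===== Notes on version B (the rewrite author's own statement) =====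
-- stated objective: alternative
-- what changed: Replaces A's accumulate-remainders divmod loop plus pad-with-zeros loop plus reverse by computing the significant-digit count d first (with an incrementally maintained power), emitting the max(d, n_sources) - d leading zeros as one block, and extracting the d significant digits positionally, most-significant first, as (number // pw) % prime with a descending power pw.
-- outside the precondition, e.g. on tuple_given(-60, 2, -6): A returns (-2, -2, 0), B returns (0, 0); on tuple_given(7, 2, -3): A returns (-1, -2, 0, -2), B returns (0, -2)
import Mathlib
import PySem

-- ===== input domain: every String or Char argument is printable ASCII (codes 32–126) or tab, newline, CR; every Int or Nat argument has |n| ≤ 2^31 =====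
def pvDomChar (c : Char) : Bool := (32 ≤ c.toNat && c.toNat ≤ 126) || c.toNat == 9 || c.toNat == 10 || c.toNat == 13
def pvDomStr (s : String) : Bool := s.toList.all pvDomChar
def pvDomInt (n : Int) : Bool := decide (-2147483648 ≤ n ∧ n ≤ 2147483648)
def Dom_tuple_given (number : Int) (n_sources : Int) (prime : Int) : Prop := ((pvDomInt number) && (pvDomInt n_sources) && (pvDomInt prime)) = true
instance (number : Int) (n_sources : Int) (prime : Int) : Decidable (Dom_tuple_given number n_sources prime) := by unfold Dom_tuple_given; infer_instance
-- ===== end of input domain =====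

-- B replaces A's accumulate-remainders-then-pad-then-reverse divmod loop by a digit-count
-- computation, a block of leading zeros, and one positional most-significant-first extraction
-- pass (objective: alternative decomposition of the same cost).

-- ===== PORT A =====
-- the while(True) divmod loop; fuel only totalises it (under Pre_ it always stops before fuel runs out)
def pvALoop (fuel : Nat) (quotient : Int) (prime : Int) (remainders : List Int) : List Int :=
  match fuel with
  | 0 => remainders
  | fuel + 1 =>
    let q := PySem.Int.floordiv quotient prime
    let r := PySem.Int.mod quotient prime
    let remainders := remainders ++ [r]
    if q = 0 then remainders else pvALoop fuel q prime remainders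

-- the 'while len(remainders) < n_sources: remainders.append(0)' loop
def pvAPad (remainders : List Int) (n_sources : Int) : List Int :=
  if h : (remainders.length : Int) < n_sources then pvAPad (remainders ++ [0]) n_sources
  else remainders
termination_by (n_sources - remainders.length).toNat
decreasing_by simp; omega

def tuple_given (number : Int) (n_sources : Int) (prime : Int) : List Int :=
  (pvAPad (pvALoop (number.natAbs + 1) number prime []) n_sources).reverse

-- ===== PORT B =====
-- 'd, pw = 1, prime; while pw <= number: d += 1; pw *= prime'; fuel only totalises it
def pvBCount (fuel : Nat) (d : Nat) (pw : Int) (number : Int) (prime : Int) : Nat × Int :=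
  match fuel with
  | 0 => (d, pw)
  | fuel + 1 => if pw ≤ number then pvBCount fuel (d + 1) (pw * prime) number prime else (d, pw)

-- 'for _ in range(d): digits.append((number // pw) % prime); pw //= prime'
def pvBExtract (fuel : Nat) (number : Int) (prime : Int) (pw : Int) (digits : List Int) : List Int :=
  match fuel with
  | 0 => digits
  | fuel + 1 =>
    pvBExtract fuel number prime (PySem.Int.floordiv pw prime)
      (digits ++ [PySem.Int.mod (PySem.Int.floordiv number pw) prime])

def tuple_given_alt (number : Int) (n_sources : Int) (prime : Int) : List Int :=
  let dp := pvBCount (number.natAbs + 1) 1 prime number prime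
  let d : Int := (dp.1 : Int)
  let L : Int := max d n_sources
  let digits := List.replicate (L - d).toNat 0
  let pw := PySem.Int.floordiv dp.2 prime
  pvBExtract dp.1 number prime pw digits

-- ===== PRECONDITION & SPEC =====
-- Pre_ is the natural base-conversion domain number ≥ 0 ∧ prime ≥ 2: outside it A raises
-- ZeroDivisionError (prime = 0), loops forever (prime = 1 with nonzero number, or a negative
-- number with a positive prime), or, for prime ≤ -2, returns a floor-divmod negative-base digit
-- string — an accident of Python's divisor-sign divmod that no positional base-prime scheme produces.
def Pre_tuple_given (number : Int) (n_sources : Int) (prime : Int) : Prop :=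
  0 ≤ number ∧ 2 ≤ prime
instance (number : Int) (n_sources : Int) (prime : Int) : Decidable (Pre_tuple_given number n_sources prime) := by unfold Pre_tuple_given; infer_instance

def pvWitness_tuple_given : Int × Int × Int := (10, 3, 3)

def Spec_tuple_given (number : Int) (n_sources : Int) (prime : Int) (out : List Int) : Prop := out = tuple_given_alt number n_sources prime
instance (number : Int) (n_sources : Int) (prime : Int) (out : List Int) : Decidable (Spec_tuple_given number n_sources prime out) := by unfold Spec_tuple_given; infer_instance

-- ===== CLAIM (what is proved, stated in full; the proofs are below) =====
def Claim_equal_tuple_given : Prop := ∀ (number : Int) (n_sources : Int) (prime : Int), Dom_tuple_given number n_sources prime → Pre_tuple_given number n_sources prime → Spec_tuple_given number n_sources prime (tuple_given number n_sources prime)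

-- ===== LEMMAS AND PROOFS =====

-- the ideal significant-digit count: least d ≥ 1 with q < p^d (proof-side only)
def pvDcnt (q p : Int) : Nat :=
  if h : 2 ≤ p ∧ p ≤ q then pvDcnt (q / p) p + 1 else 1
termination_by q.toNat
decreasing_by
  have h2 : (2:Int) ≤ p := h.1
  have hq : p ≤ q := h.2
  have h0 : 0 ≤ q / p := Int.ediv_nonneg (by omega) (by omega)
  have hd1 : 1 ≤ q / p := (Int.le_ediv_iff_mul_le (by omega)).2 (by omega)
  have hmul : q / p * p ≤ q := Int.ediv_mul_le q (by omega)
  have hlt : q / p < q := by nlinarith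
  omega

theorem pvDcnt_pos (q p : Int) : 1 ≤ pvDcnt q p := by
  unfold pvDcnt; split <;> omega

theorem pv_ediv_lt (q p : Int) (h2 : 2 ≤ p) (hq : p ≤ q) : q / p < q := by
  have hd1 : 1 ≤ q / p := (Int.le_ediv_iff_mul_le (by omega)).2 (by omega)
  have hmul : q / p * p ≤ q := Int.ediv_mul_le q (by omega)
  nlinarith

theorem pvDcnt_lt (q p : Int) (hq : 0 ≤ q) (hp : 2 ≤ p) : q < p ^ pvDcnt q p := by
  revert hq
  induction q using pvDcnt.induct (p := p) with
  | case1 q h ih =>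
    intro hq
    rw [pvDcnt, dif_pos h]
    have h0 : 0 ≤ q / p := Int.ediv_nonneg hq (by omega)
    have ihx := ih h0
    have h3 : q < (q / p + 1) * p := Int.lt_ediv_add_one_mul_self q (by omega)
    have h4 : q / p + 1 ≤ p ^ pvDcnt (q / p) p := by omega
    have h5 : (q / p + 1) * p ≤ p ^ pvDcnt (q / p) p * p :=
      mul_le_mul_of_nonneg_right h4 (by omega)
    calc q < (q / p + 1) * p := h3
      _ ≤ p ^ pvDcnt (q / p) p * p := h5
      _ = p ^ (pvDcnt (q / p) p + 1) := (pow_succ p _).symm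
  | case2 q h =>
    intro hq
    rw [pvDcnt, dif_neg h]
    have : q < p := by omega
    simpa using this

theorem pvDcnt_min (q p : Int) (hq : 0 ≤ q) (hp : 2 ≤ p) :
    ∀ k : Nat, 1 ≤ k → q < p ^ k → pvDcnt q p ≤ k := by
  revert hq
  induction q using pvDcnt.induct (p := p) with
  | case1 q h ih =>
    intro hq k hk hqk
    rw [pvDcnt, dif_pos h]
    have h0 : 0 ≤ q / p := Int.ediv_nonneg hq (by omega)
    rcases Nat.exists_eq_add_of_le hk with ⟨k', rfl⟩
    have hk' : 1 ≤ k' := by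
      by_contra hc
      have : k' = 0 := by omega
      subst this
      simp at hqk
      omega
    have hdiv : q / p < p ^ k' := by
      rw [Int.ediv_lt_iff_lt_mul (by omega : (0:Int) < p)]
      calc q < p ^ (1 + k') := hqk
        _ = p ^ k' * p := by rw [add_comm, pow_succ]
    have := ih h0 k' hk' hdiv
    omega
  | case2 q h =>
    intro hq k hk _
    rw [pvDcnt, dif_neg h]
    omega

-- PySem floordiv by a positive power is integer ediv
theorem pv_fd_pow (q p : Int) (hp : 2 ≤ p) (j : Nat) :
    PySem.Int.floordiv q (p ^ j) = q / p ^ j :=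
  PySem.Int.floordiv_eq_ediv_of_pos (pow_pos (by omega) j)

-- iterated floor division composes with powers
theorem pv_fd_step (q p : Int) (hp : 2 ≤ p) (j : Nat) :
    PySem.Int.floordiv (PySem.Int.floordiv q p) (p ^ j) = PySem.Int.floordiv q (p ^ (j + 1)) := by
  rw [pv_fd_pow _ p hp, pv_fd_pow q p hp,
    PySem.Int.floordiv_eq_ediv_of_pos (by omega : (0:Int) < p),
    Int.ediv_ediv_of_nonneg (by omega : (0:Int) ≤ p), ← pow_succ']

-- the digit function both programs produce
def pvDigit (n p : Int) (j : Nat) : Int := PySem.Int.mod (PySem.Int.floordiv n (p ^ j)) p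

-- A's divmod loop produces exactly the first pvDcnt little-endian digits
theorem pvALoop_eq (p : Int) (hp : 2 ≤ p) :
    ∀ (fuel : Nat) (q : Int) (acc : List Int), 0 ≤ q → q.toNat < fuel →
      pvALoop fuel q p acc = acc ++ (List.range (pvDcnt q p)).map (pvDigit q p) := by
  intro fuel
  induction fuel with
  | zero => intro q acc _ h; omega
  | succ f ih =>
    intro q acc hq hf
    have hppos : (0:Int) < p := by omega
    have hfd : PySem.Int.floordiv q p = q / p := PySem.Int.floordiv_eq_ediv_of_pos hppos
    by_cases hcase : p ≤ q
    · -- quotient nonzero: recurse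
      have hqp0 : 0 ≤ q / p := Int.ediv_nonneg hq (by omega)
      have hqp1 : 1 ≤ q / p := (Int.le_ediv_iff_mul_le hppos).2 (by omega)
      have hne : q / p ≠ 0 := by omega
      have hlt : q / p < q := pv_ediv_lt q p hp hcase
      have hfl : (q / p).toNat < f := by omega
      have step := ih (q / p) (acc ++ [PySem.Int.mod q p]) hqp0 hfl
      rw [pvALoop]
      simp only [hfd]
      rw [if_neg hne, step]
      have hcnt : pvDcnt q p = pvDcnt (q / p) p + 1 := by
        rw [pvDcnt, dif_pos ⟨hp, hcase⟩]
      rw [hcnt, List.range_succ_eq_map, List.map_cons, List.map_map]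
      have hd0 : pvDigit q p 0 = PySem.Int.mod q p := by
        simp [pvDigit, PySem.Int.floordiv_eq_ediv_of_pos, hppos]
      have hmap : (List.range (pvDcnt (q / p) p)).map (pvDigit q p ∘ Nat.succ)
          = (List.range (pvDcnt (q / p) p)).map (pvDigit (q / p) p) := by
        apply List.map_congr_left
        intro j _
        show pvDigit q p (j + 1) = pvDigit (q / p) p j
        unfold pvDigit
        rw [← pv_fd_step q p hp j, hfd]
      rw [hd0, hmap]
      simp
    · -- quotient zero: one digit and stop
      have hzero : PySem.Int.floordiv q p = 0 := by
        rw [hfd]; exact Int.ediv_eq_zero_of_lt hq (by omega)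
      have hcnt : pvDcnt q p = 1 := by rw [pvDcnt, dif_neg (by omega)]
      have hd0 : pvDigit q p 0 = PySem.Int.mod q p := by
        simp [pvDigit, PySem.Int.floordiv_eq_ediv_of_pos, hppos]
      rw [pvALoop, hcnt]
      simp [hzero, hd0]

-- the pad loop appends exactly the missing zeros
theorem pvAPad_eq (xs : List Int) (ns : Int) :
    pvAPad xs ns = xs ++ List.replicate (ns - xs.length).toNat 0 := by
  induction xs using pvAPad.induct (n_sources := ns) with
  | case1 xs h ih =>
    rw [pvAPad, dif_pos h, ih]
    have hlen : ((xs ++ [0]).length : Int) = (xs.length : Int) + 1 := by simp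
    have hk : (ns - ((xs ++ [0]).length : Int)).toNat + 1 = (ns - xs.length).toNat := by
      rw [hlen]; omega
    rw [← hk, List.replicate_succ]
    simp
  | case2 xs h =>
    rw [pvAPad, dif_neg h]
    have : (ns - (xs.length : Int)).toNat = 0 := by omega
    simp [this]

-- B's count loop (with its incremental power) reaches the ideal digit count
theorem pvBCount_eq_dcnt (n p : Int) (hq : 0 ≤ n) (hp : 2 ≤ p) :
    ∀ (fuel d : Nat), 1 ≤ d → (∀ k : Nat, 1 ≤ k → n < p ^ k → d ≤ k) →
      n < p ^ (d + fuel) → pvBCount fuel d (p ^ d) n p = (pvDcnt n p, p ^ pvDcnt n p) := by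
  intro fuel
  induction fuel with
  | zero =>
    intro d hd hmin hfuel
    have : d = pvDcnt n p :=
      le_antisymm (hmin _ (pvDcnt_pos n p) (pvDcnt_lt n p hq hp))
        (pvDcnt_min n p hq hp d hd (by simpa using hfuel))
    rw [pvBCount, this]
  | succ f ih =>
    intro d hd hmin hfuel
    rw [pvBCount]
    by_cases hc : p ^ d ≤ n
    · rw [if_pos hc, ← pow_succ]
      apply ih (d + 1) (by omega)
      · intro k hk hnk
        have hdk : p ^ d < p ^ k := by omega
        have : d < k := by
          by_contra hge
          have : p ^ k ≤ p ^ d := pow_le_pow_right₀ (by omega : (1:Int) ≤ p) (by omega)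
          omega
        omega
      · have : d + 1 + f = d + (f + 1) := by omega
        rw [this]; exact hfuel
    · rw [if_neg hc]
      have : d = pvDcnt n p :=
        le_antisymm (hmin _ (pvDcnt_pos n p) (pvDcnt_lt n p hq hp))
          (pvDcnt_min n p hq hp d hd (by omega))
      rw [this]

-- the fuel bound: n < p ^ (n.natAbs + k) for k ≥ 1
theorem pv_fuel_bound (n p : Int) (hq : 0 ≤ n) (hp : 2 ≤ p) (k : Nat) (hk : 1 ≤ k) :
    n < p ^ (n.natAbs + k) := by
  have h1 : (n.natAbs : Int) < 2 ^ n.natAbs := by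
    exact_mod_cast Nat.lt_two_pow_self
  have h2 : (2:Int) ^ n.natAbs ≤ p ^ n.natAbs :=
    pow_le_pow_left₀ (by omega) (by omega) n.natAbs
  have h3 : p ^ n.natAbs ≤ p ^ (n.natAbs + k) :=
    pow_le_pow_right₀ (by omega) (by omega)
  have h4 : n = (n.natAbs : Int) := by omega
  omega

-- B's extraction loop, started at p^(k-1), emits the top k digits most-significant first
theorem pvBExtract_eq (n p : Int) (hp : 2 ≤ p) :
    ∀ (k : Nat) (acc : List Int),
      pvBExtract k n p (p ^ (k - 1)) acc
        = acc ++ (List.range k).map (fun i => pvDigit n p (k - 1 - i)) := by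
  intro k
  induction k with
  | zero => intro acc; simp [pvBExtract]
  | succ k ih =>
    intro acc
    rw [pvBExtract]
    by_cases hk : k = 0
    · subst hk
      simp [pvBExtract, pvDigit]
    · have hstep : PySem.Int.floordiv (p ^ (k + 1 - 1)) p = p ^ (k - 1) := by
        rw [PySem.Int.floordiv_eq_ediv_of_pos (by omega : (0:Int) < p)]
        rw [show k + 1 - 1 = k - 1 + 1 from by omega, pow_succ]
        exact Int.mul_ediv_cancel _ (by omega)
      rw [hstep, ih]
      have hmap : (List.range (k + 1)).map (fun i => pvDigit n p (k + 1 - 1 - i))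
          = pvDigit n p k :: (List.range k).map (fun i => pvDigit n p (k - 1 - i)) := by
        rw [List.range_succ_eq_map, List.map_cons, List.map_map]
        congr 1
        apply List.map_congr_left
        intro j _
        simp only [Function.comp_apply]
        congr 1
        omega
      rw [hmap]
      have hd : PySem.Int.mod (PySem.Int.floordiv n (p ^ (k + 1 - 1))) p = pvDigit n p k := by
        simp [pvDigit]
      rw [hd]
      simp

-- most-significant-first indexing is the reverse of little-endian indexing
theorem pv_rev_index (f : Nat → Int) (n : Nat) :
    (List.range n).map (fun i => f (n - 1 - i)) = ((List.range n).map f).reverse := by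
  apply List.ext_getElem
  · simp
  · intro i h1 h2
    simp only [List.getElem_map, List.getElem_range, List.getElem_reverse]
    congr 1
    simp at h1 h2 ⊢

-- ===== VERDICT (by name: the statement is the Claim_ definition above) =====
theorem tuple_given_spec : Claim_equal_tuple_given := by
  intro n ns p _ hpre
  obtain ⟨hn, hp⟩ := hpre
  have hcount : pvBCount (n.natAbs + 1) 1 p n p = (pvDcnt n p, p ^ pvDcnt n p) := by
    have := pvBCount_eq_dcnt n p hn hp (n.natAbs + 1) 1 (by omega) (fun k hk _ => hk)
      (by rw [show 1 + (n.natAbs + 1) = n.natAbs + 2 from by omega]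
          exact pv_fuel_bound n p hn hp 2 (by omega))
    simpa using this
  have hloop : pvALoop (n.natAbs + 1) n p [] =
      (List.range (pvDcnt n p)).map (pvDigit n p) := by
    have := pvALoop_eq p hp (n.natAbs + 1) n [] hn (by omega)
    simpa using this
  set D := pvDcnt n p with hDdef
  have hD1 : 1 ≤ D := pvDcnt_pos n p
  have hpw : PySem.Int.floordiv (p ^ D) p = p ^ (D - 1) := by
    rw [PySem.Int.floordiv_eq_ediv_of_pos (by omega : (0:Int) < p)]
    rw [show D = D - 1 + 1 from by omega, pow_succ]
    rw [Int.mul_ediv_cancel _ (by omega : p ≠ 0)]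
    norm_num
  unfold Spec_tuple_given tuple_given
  simp only [tuple_given_alt, hcount]
  rw [hloop, pvAPad_eq]
  simp only [List.length_map, List.length_range]
  rw [hpw, pvBExtract_eq n p hp D, pv_rev_index, List.reverse_append, List.reverse_replicate]
  have hns : (ns - (D:Int)).toNat = (max (D:Int) ns - (D:Int)).toNat := by omega
  rw [hns]
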